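-- pv_equiv track=rewrite | github.com/lukasellinger/evaluating-word-definitions | general_utils/utils.py | generate_case_combinations
-- ===== SOURCE A (Python) =====
-- import itertools
-- from typing import Dict, List, Tuple
--
-- def generate_case_combinations(txt: str) -> List[str]:
--     """
--     Generates all combinations of uppercase and lowercase for the first letter of each word in
--     a string.
--
--     :param txt: The input string.
--     :return: A list of all case variations for the input text.
--     """
--     words = txt.split()
--     combinations = []
--
--     # Generate all combinations of upper and lower case for the first letter of each word
--     for case_pattern in itertools.product(*[(word[0].lower(), word[0].upper()) for word in words]):
--         # Reconstruct the sentence with the current case pattern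
--         combination = " ".join(
--             pattern + word[1:] for pattern, word in zip(case_pattern, words)
--         )
--         combinations.append(combination)
--
--     return combinations
-- ===== SOURCE B (Python) =====
-- def generate_case_combinations(txt: str):
--     """Direct unranking: there are 2**n results; the k-th one is read off the
--     binary digits of k (least-significant bit = last word, 1 = uppercase)."""
--     words = txt.split()
--     out = []
--     for i in range(2 ** len(words)):
--         toks = []
--         x = i
--         for w in reversed(words):
--             first = w[0].upper() if x % 2 else w[0].lower()
--             toks.insert(0, first + w[1:])
--             x //= 2
--         out.append(" ".join(toks))
--     return out
-- ===== Notes on version B (the rewrite author's own statement) =====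
-- stated objective: alternative
-- what changed: Replaces itertools.product enumeration of first-letter patterns with direct unranking: the k-th of the 2**n sentences is decoded from the binary digits of k by repeated divmod over the reversed word list, building tokens back-to-front; no product/pattern lists are ever materialized.
import Mathlib
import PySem

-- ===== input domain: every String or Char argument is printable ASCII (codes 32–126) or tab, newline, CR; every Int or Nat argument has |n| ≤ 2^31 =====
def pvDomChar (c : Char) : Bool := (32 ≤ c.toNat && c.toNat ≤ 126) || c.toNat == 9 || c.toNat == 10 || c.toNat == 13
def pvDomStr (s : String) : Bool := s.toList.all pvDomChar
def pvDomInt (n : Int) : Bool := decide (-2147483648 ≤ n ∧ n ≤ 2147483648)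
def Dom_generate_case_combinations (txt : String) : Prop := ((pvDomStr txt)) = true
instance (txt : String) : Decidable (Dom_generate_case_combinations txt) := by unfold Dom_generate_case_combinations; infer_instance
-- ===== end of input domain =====

-- B drops itertools.product entirely: it unranks each of the 2^n results from the binary digits of its index; same cost, different algorithm.

-- ===== PORT A =====
-- itertools.product over the listed factors (first factor slowest-varying)
def pvProduct {α : Type} : List (List α) → List (List α)
  | [] => [[]]
  | l :: rest => l.flatMap (fun x => (pvProduct rest).map (x :: ·))

-- word[0].lower() / word[0].upper() as a one-char string; split() tokens are never empty, so the [] case is unreachable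
def pvFirstLo (w : List Char) : List Char := match w with | [] => [] | c :: _ => PySem.Chars.lower [c]
def pvFirstUp (w : List Char) : List Char := match w with | [] => [] | c :: _ => PySem.Chars.upper [c]

def generate_case_combinations (txt : String) : List String :=
  let words := (PySem.Str.split₀ txt).map String.toList
  let pats := pvProduct (words.map (fun w => [pvFirstLo w, pvFirstUp w]))
  pats.foldl (fun combs pat =>
    combs ++ [String.ofList (PySem.Chars.join [' ']
      ((pat.zip words).map (fun pw => pw.1 ++ PySem.Chars.slice pw.2 (some 1) none)))]) []

-- ===== PORT B =====
-- word[0].lower()+word[1:] / word[0].upper()+word[1:] as whole-word variants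
def pvLoVar (w : List Char) : List Char := match w with | [] => [] | c :: rest => PySem.Chars.lowerChar c :: rest
def pvHiVar (w : List Char) : List Char := match w with | [] => [] | c :: rest => PySem.Chars.upperChar c :: rest

-- the inner loop: over reversed(words), pick the variant by x % 2, prepend it, halve x
def pvUnrank (words : List (List Char)) (i : Int) : List (List Char) :=
  (words.reverse.foldl (fun (st : Int × List (List Char)) w =>
      (PySem.Int.floordiv st.1 2,
       (if PySem.Int.mod st.1 2 ≠ 0 then pvHiVar w else pvLoVar w) :: st.2))
    (i, [])).2

def generate_case_combinations_alt (txt : String) : List String :=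
  let words := (PySem.Str.split₀ txt).map String.toList
  (PySem.List.pyRange 0 ((2 : Int) ^ words.length) 1).foldl
    (fun out i => out ++ [String.ofList (PySem.Chars.join [' '] (pvUnrank words i))]) []

-- ===== PRECONDITION & SPEC =====
def Spec_generate_case_combinations (txt : String) (out : List String) : Prop := out = generate_case_combinations_alt txt
instance (txt : String) (out : List String) : Decidable (Spec_generate_case_combinations txt out) := by unfold Spec_generate_case_combinations; infer_instance

-- ===== CLAIM (what is proved, stated in full; the proofs are below) =====
def Claim_equal_generate_case_combinations : Prop := ∀ (txt : String), Dom_generate_case_combinations txt → Spec_generate_case_combinations txt (generate_case_combinations txt)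

-- ===== LEMMAS AND PROOFS =====

-- A's zip-reconstruction of a first-letter pattern equals the product of full word variants
theorem pv_zipmap (ws : List (List Char)) :
    (pvProduct (ws.map (fun w => [pvFirstLo w, pvFirstUp w]))).map
      (fun pat => (pat.zip ws).map (fun pw => pw.1 ++ PySem.Chars.slice pw.2 (some 1) none))
    = pvProduct (ws.map (fun w => [pvLoVar w, pvHiVar w])) := by
  induction ws with
  | nil => simp [pvProduct]
  | cons w ws ih =>
    have hlo : pvFirstLo w ++ PySem.List.slice w (some 1) none = pvLoVar w := by
      cases w <;> simp [pvFirstLo, pvLoVar, PySem.Chars.lower, PySem.List.slice]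
    have hhi : pvFirstUp w ++ PySem.List.slice w (some 1) none = pvHiVar w := by
      cases w <;> simp [pvFirstUp, pvHiVar, PySem.Chars.upper, PySem.List.slice]
    simp only [List.map_cons, pvProduct, List.flatMap_cons, List.flatMap_nil, List.map_append,
      List.map_map, List.append_nil, ← ih]
    congr 1 <;> · apply List.map_congr_left; intro pat _; simp [Function.comp, hlo, hhi]

-- the inner loop's accumulator splits off: toks built so far are only appended to
theorem pv_unrank_acc (rs : List (List Char)) (x : Int) (acc : List (List Char)) :
    rs.foldl (fun (st : Int × List (List Char)) w =>
        (PySem.Int.floordiv st.1 2,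
         (if PySem.Int.mod st.1 2 ≠ 0 then pvHiVar w else pvLoVar w) :: st.2)) (x, acc)
    = ((rs.foldl (fun (st : Int × List (List Char)) w =>
        (PySem.Int.floordiv st.1 2,
         (if PySem.Int.mod st.1 2 ≠ 0 then pvHiVar w else pvLoVar w) :: st.2)) (x, [])).1,
       (rs.foldl (fun (st : Int × List (List Char)) w =>
        (PySem.Int.floordiv st.1 2,
         (if PySem.Int.mod st.1 2 ≠ 0 then pvHiVar w else pvLoVar w) :: st.2)) (x, [])).2 ++ acc) := by
  induction rs generalizing x acc with
  | nil => simp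
  | cons r rs ih =>
    simp only [List.foldl_cons]
    rw [ih, ih (PySem.Int.floordiv x 2) [_]]
    simp

-- peeling the LAST word: it is decided by i's parity, the rest by i // 2
theorem pv_unrank_snoc (ws : List (List Char)) (w : List Char) (i : Int) :
    pvUnrank (ws ++ [w]) i
    = pvUnrank ws (PySem.Int.floordiv i 2)
        ++ [if PySem.Int.mod i 2 ≠ 0 then pvHiVar w else pvLoVar w] := by
  simp only [pvUnrank, List.reverse_append, List.reverse_cons, List.reverse_nil,
    List.nil_append, List.cons_append, List.foldl_cons]
  rw [pv_unrank_acc]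

-- evens and odds interleaved: range(2m) pairs up
theorem pv_range_double (m : Nat) :
    List.range (2 * m) = (List.range m).flatMap (fun k => [2 * k, 2 * k + 1]) := by
  induction m with
  | zero => simp
  | succ m ih =>
    have : 2 * (m + 1) = (2 * m + 1) + 1 := by omega
    rw [this, List.range_succ, List.range_succ, ih, List.range_succ]
    simp [List.flatMap_append]

-- pvProduct peels a trailing factor
theorem pv_product_snoc {α : Type} (ls : List (List α)) (l : List α) :
    pvProduct (ls ++ [l]) = (pvProduct ls).flatMap (fun r => l.map (fun x => r ++ [x])) := by
  induction ls with
  | nil =>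
    simp [pvProduct]
    rw [← List.map_eq_flatMap]
  | cons a ls ih =>
    simp only [List.cons_append, pvProduct, ih, List.flatMap_assoc, List.map_flatMap]
    apply List.flatMap_congr
    intro x _
    simp [List.flatMap_map, List.map_map, Function.comp_def]

-- unranking all indices 0..2^n-1 enumerates the product of word variants, in order
theorem pv_unrank_range (ws : List (List Char)) :
    (List.range (2 ^ ws.length)).map (fun k => pvUnrank ws (Int.ofNat k))
    = pvProduct (ws.map (fun w => [pvLoVar w, pvHiVar w])) := by
  induction ws using List.reverseRecOn with
  | nil => simp [pvUnrank, pvProduct]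
  | append_singleton ws w ih =>
    have hlen : 2 ^ (ws ++ [w]).length = 2 * 2 ^ ws.length := by
      simp [List.length_append, pow_succ]; ring
    rw [hlen, pv_range_double, List.map_flatMap, List.map_append, List.map_singleton,
      pv_product_snoc, ← ih, List.flatMap_map]
    apply List.flatMap_congr
    intro k _
    have hdiv : ∀ j : Nat, PySem.Int.floordiv (Int.ofNat j) 2 = Int.ofNat (j / 2) := by
      intro j; exact_mod_cast PySem.Int.floordiv_natCast j 2
    have hmod : ∀ j : Nat, PySem.Int.mod (Int.ofNat j) 2 = Int.ofNat (j % 2) := by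
      intro j; exact_mod_cast PySem.Int.mod_natCast j 2
    simp only [List.map_cons, List.map_nil]
    rw [pv_unrank_snoc, pv_unrank_snoc, hdiv, hdiv, hmod, hmod]
    have e1 : (2 * k) / 2 = k := by omega
    have e2 : (2 * k + 1) / 2 = k := by omega
    have e3 : (2 * k) % 2 = 0 := by omega
    have e4 : (2 * k + 1) % 2 = 1 := by omega
    rw [e1, e2, e3, e4]
    simp

-- both ports over the same token list ws compute the same list of joined sentences
theorem pv_main (ws : List (List Char)) :
    (pvProduct (ws.map (fun w => [pvFirstLo w, pvFirstUp w]))).foldl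
      (fun combs pat => combs ++ [String.ofList (PySem.Chars.join [' ']
        ((pat.zip ws).map (fun pw => pw.1 ++ PySem.Chars.slice pw.2 (some 1) none)))]) []
    = (PySem.List.pyRange 0 ((2 : Int) ^ ws.length) 1).foldl
        (fun out i => out ++ [String.ofList (PySem.Chars.join [' '] (pvUnrank ws i))]) [] := by
  rw [PySem.List.foldl_append_singleton_eq_map, PySem.List.foldl_append_singleton_eq_map]
  have hc : ((2 : Int) ^ ws.length) = ((2 ^ ws.length : Nat) : Int) := by push_cast; ring
  have h1 : (pvProduct (ws.map (fun w => [pvFirstLo w, pvFirstUp w]))).map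
      (fun pat => String.ofList (PySem.Chars.join [' ']
        ((pat.zip ws).map (fun pw => pw.1 ++ PySem.Chars.slice pw.2 (some 1) none))))
    = ((pvProduct (ws.map (fun w => [pvFirstLo w, pvFirstUp w]))).map
        (fun pat => (pat.zip ws).map (fun pw => pw.1 ++ PySem.Chars.slice pw.2 (some 1) none))).map
        (fun r => String.ofList (PySem.Chars.join [' '] r)) := by
    simp [List.map_map, Function.comp_def]
  rw [hc, PySem.List.pyRange_zero_natCast, h1, pv_zipmap, ← pv_unrank_range]
  simp [List.map_map, Function.comp_def]

theorem generate_case_combinations_eq (txt : String) :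
    generate_case_combinations txt = generate_case_combinations_alt txt :=
  pv_main ((PySem.Str.split₀ txt).map String.toList)

-- ===== VERDICT (by name: the statement is the Claim_ definition above) =====
theorem generate_case_combinations_spec : Claim_equal_generate_case_combinations := by
  intro txt _
  exact generate_case_combinations_eq txt
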